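-- pv_equiv track=rewrite | github.com/shanjiaming/lean-pl-fix | solvers/dpv2_solver.py | _parse_dpv2_output
-- ===== SOURCE A (Python) =====
-- def _parse_dpv2_output(output: str) -> str:
--     """
--     Parse DPV2 output to extract the solution.
--
--     Args:
--         output: Raw DPV2 output
--
--     Returns:
--         Extracted solution
--     """
--     # DPV2 output parsing logic
--     # This is a simplified version - actual parsing may need to be more sophisticated
--
--     lines = output.split('\n')
--     solution_lines = []
--     in_solution = False
--
--     for line in lines:
--         # Look for solution markers
--         if 'theorem' in line.lower() or 'proof' in line.lower():
--             in_solution = True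
--             solution_lines.append(line)
--         elif in_solution:
--             if line.strip() == '' and solution_lines:
--                 # End of solution
--                 break
--             solution_lines.append(line)
--
--     if solution_lines:
--         return '\n'.join(solution_lines)
--     else:
--         # If no clear solution found, return the entire output
--         return output.strip()
-- ===== SOURCE B (Python) =====
-- def _parse_dpv2_output(output: str) -> str:
--     """Paragraph decomposition: group lines into blank-separated paragraphs,
--     then return the suffix (from its first marker line) of the first paragraph
--     containing a marker; fall back to the stripped output."""
--     paragraphs = []
--     cur = []
--     for line in output.split('\n'):
--         if line.strip() == '':
--             paragraphs.append(cur)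
--             cur = []
--         else:
--             cur.append(line)
--     paragraphs.append(cur)
--     for para in paragraphs:
--         tail = para
--         while tail and not ('theorem' in tail[0].lower() or 'proof' in tail[0].lower()):
--             tail = tail[1:]
--         if tail:
--             return '\n'.join(tail)
--     return output.strip()
-- ===== Notes on version B (the rewrite author's own statement) =====
-- stated objective: alternative
-- what changed: Replaces A's single flagged scan with accumulator by a paragraph decomposition: a grouping pass that splits the lines into blank-separated paragraphs, then a search over that intermediate structure returning the suffix of the first marker-containing paragraph from its first marker line.
import Mathlib
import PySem

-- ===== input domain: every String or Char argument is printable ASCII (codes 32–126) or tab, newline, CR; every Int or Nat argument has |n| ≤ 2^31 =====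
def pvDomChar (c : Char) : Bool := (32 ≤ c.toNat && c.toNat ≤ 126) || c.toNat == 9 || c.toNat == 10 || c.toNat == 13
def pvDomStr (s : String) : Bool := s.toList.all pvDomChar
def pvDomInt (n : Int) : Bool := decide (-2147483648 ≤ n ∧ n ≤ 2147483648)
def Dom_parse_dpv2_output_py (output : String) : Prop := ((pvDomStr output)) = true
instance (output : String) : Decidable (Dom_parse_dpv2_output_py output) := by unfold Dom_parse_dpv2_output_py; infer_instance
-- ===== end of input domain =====

-- B replaces A's single flagged scan by a paragraph decomposition: group the lines into
-- blank-separated paragraphs, then return the suffix (from its first marker line) of the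
-- first paragraph containing a marker (objective: alternative; same return value, same cost).

-- shared by both ports: the verbatim Python tests
-- "'theorem' in line.lower() or 'proof' in line.lower()" and "line.strip() == ''"
def pvIsMarker (line : String) : Bool :=
  PySem.Str.isIn "theorem" (PySem.Str.lower line) || PySem.Str.isIn "proof" (PySem.Str.lower line)

def pvIsBlank (line : String) : Bool := PySem.Str.strip line == ""

-- ===== PORT A =====
-- the for-loop over lines with state (solution_lines, in_solution); returning acc = break
def pvALoop : List String → List String → Bool → List String
  | [], acc, _ => acc
  | line :: rest, acc, inSol =>
    if pvIsMarker line then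
      pvALoop rest (acc ++ [line]) true
    else if inSol then
      if pvIsBlank line && !acc.isEmpty then acc
      else pvALoop rest (acc ++ [line]) inSol
    else pvALoop rest acc inSol

def parse_dpv2_output_py (output : String) : String :=
  let lines := (PySem.Str.split? output "\n").getD []
  let sol := pvALoop lines [] false
  if !sol.isEmpty then PySem.Str.join "\n" sol else PySem.Str.strip output

-- ===== PORT B =====
-- the grouping loop over lines with state (paragraphs, cur); final `paragraphs.append(cur)`
def pvParasAux : List String → List String → List (List String)
  | [], cur => [cur]
  | l :: ls, cur => if pvIsBlank l then cur :: pvParasAux ls [] else pvParasAux ls (cur ++ [l])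

-- the inner `while tail and not marker(tail[0]): tail = tail[1:]` loop
def pvDropToMarker : List String → List String
  | [] => []
  | l :: ls => if pvIsMarker l then l :: ls else pvDropToMarker ls

-- the `for para in paragraphs` loop; `return` = stopping with `some tail`
def pvFindPara : List (List String) → Option (List String)
  | [] => none
  | p :: ps =>
    let tail := pvDropToMarker p
    if tail.isEmpty then pvFindPara ps else some tail

def parse_dpv2_output_py_alt (output : String) : String :=
  let lines := (PySem.Str.split? output "\n").getD []
  match pvFindPara (pvParasAux lines []) with
  | none => PySem.Str.strip output
  | some tail => PySem.Str.join "\n" tail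

-- ===== PRECONDITION & SPEC =====
def Spec_parse_dpv2_output_py (output : String) (out : String) : Prop := out = parse_dpv2_output_py_alt output
instance (output : String) (out : String) : Decidable (Spec_parse_dpv2_output_py output out) := by unfold Spec_parse_dpv2_output_py; infer_instance

-- ===== CLAIM (what is proved, stated in full; the proofs are below) =====
def Claim_equal_parse_dpv2_output_py : Prop := ∀ (output : String), Dom_parse_dpv2_output_py output → Spec_parse_dpv2_output_py output (parse_dpv2_output_py output)

-- ===== LEMMAS AND PROOFS =====

-- a char whose lowercase is 't' or 'p' is not whitespace
lemma pv_lower_tp_not_space (c : Char) (h : PySem.Chars.lowerChar c = 't' ∨ PySem.Chars.lowerChar c = 'p') :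
    PySem.Chars.isspace c = false := by
  by_cases hu : PySem.Chars.isupper c = true
  · simp only [PySem.Chars.isupper, Bool.and_eq_true, decide_eq_true_eq] at hu
    obtain ⟨h1, h2⟩ := hu
    rw [Char.le_def, UInt32.le_iff_toNat_le] at h1 h2
    have h3 : 65 ≤ c.toNat := h1
    have h4 : c.toNat ≤ 90 := h2
    rw [PySem.Chars.isspace]
    simp only [Bool.or_eq_false_iff, Bool.and_eq_false_iff, decide_eq_false_iff_not]
    omega
  · simp only [PySem.Chars.lowerChar, hu] at h
    rcases h with h | h <;> subst h <;> decide

-- a line whose strip is empty consists of whitespace only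
lemma pv_blank_all_space (cs : List Char) (h : PySem.Chars.strip cs = []) :
    ∀ c ∈ cs, PySem.Chars.isspace c = true := by
  simp only [PySem.Chars.strip, PySem.Chars.rstrip, PySem.Chars.lstrip] at h
  have h1 : List.dropWhile PySem.Chars.isspace (List.dropWhile PySem.Chars.isspace cs).reverse = [] := by
    cases h' : List.dropWhile PySem.Chars.isspace (List.dropWhile PySem.Chars.isspace cs).reverse with
    | nil => rfl
    | cons a t => rw [h'] at h; simp at h
  have h2 : ∀ c ∈ (List.dropWhile PySem.Chars.isspace cs).reverse, PySem.Chars.isspace c = true :=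
    List.dropWhile_eq_nil_iff.mp h1
  intro c hc
  rcases List.mem_append.mp ((List.takeWhile_append_dropWhile (p := PySem.Chars.isspace) (l := cs)) ▸ hc) with hm | hm
  · exact List.mem_takeWhile_imp hm
  · exact h2 c (List.mem_reverse.mpr hm)

-- a marker line is never blank
lemma pv_marker_not_blank (l : String) (h : pvIsMarker l = true) : pvIsBlank l = false := by
  by_contra hb
  have hb' : pvIsBlank l = true := by
    cases hB : pvIsBlank l
    · exact absurd hB hb
    · rfl
  have hstrip : PySem.Chars.strip l.toList = [] := by
    simp only [pvIsBlank, beq_iff_eq] at hb'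
    have := congrArg String.toList hb'
    rwa [PySem.Str.toList_strip] at this
  have hall := pv_blank_all_space l.toList hstrip
  simp only [pvIsMarker, Bool.or_eq_true] at h
  have hex : ∃ c ∈ l.toList, PySem.Chars.lowerChar c = 't' ∨ PySem.Chars.lowerChar c = 'p' := by
    rcases h with h | h
    · have hinf : ("theorem").toList <:+: (PySem.Str.lower l).toList := (PySem.Str.isIn_iff_infix _ _).mp h
      rw [PySem.Str.toList_lower] at hinf
      have hmem : 't' ∈ PySem.Chars.lower l.toList := hinf.subset (by decide)
      simp only [PySem.Chars.lower, List.mem_map] at hmem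
      obtain ⟨c, hc, hc'⟩ := hmem
      exact ⟨c, hc, Or.inl hc'⟩
    · have hinf : ("proof").toList <:+: (PySem.Str.lower l).toList := (PySem.Str.isIn_iff_infix _ _).mp h
      rw [PySem.Str.toList_lower] at hinf
      have hmem : 'p' ∈ PySem.Chars.lower l.toList := hinf.subset (by decide)
      simp only [PySem.Chars.lower, List.mem_map] at hmem
      obtain ⟨c, hc, hc'⟩ := hmem
      exact ⟨c, hc, Or.inr hc'⟩
  obtain ⟨c, hc, hc'⟩ := hex
  have := pv_lower_tp_not_space c hc'
  rw [hall c hc] at this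
  exact Bool.true_eq_false.mp this

-- take up to the first index where p holds = takeWhile (!p)
lemma pv_takeWhile_findIdx (p : String → Bool) (l : List String) :
    l.takeWhile (fun x => !p x) = l.take ((l.findIdx? p).getD l.length) := by
  induction l with
  | nil => rfl
  | cons a l ih =>
    by_cases h : p a = true
    · simp [List.findIdx?_cons, h]
    · simp only [Bool.not_eq_true] at h
      cases hf : l.findIdx? p with
      | none => simp [List.findIdx?_cons, h, hf] at ih ⊢; exact ih
      | some i => simp [List.findIdx?_cons, h, hf] at ih ⊢; exact ih

-- collect phase of A's loop: append lines until the first blank one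
lemma pv_loop_collect (rest : List String) :
    ∀ acc : List String, acc ≠ [] →
      pvALoop rest acc true = acc ++ rest.takeWhile (fun l => !pvIsBlank l) := by
  induction rest with
  | nil => intro acc _; simp [pvALoop]
  | cons line ls ih =>
    intro acc hacc
    by_cases hm : pvIsMarker line = true
    · have hnb := pv_marker_not_blank line hm
      rw [pvALoop]
      simp only [hm, if_true]
      rw [ih (acc ++ [line]) (by simp)]
      simp [hnb]
    · have hm' : pvIsMarker line = false := by
        cases h : pvIsMarker line
        · rfl
        · exact absurd h hm
      rw [pvALoop]
      simp only [hm', Bool.false_eq_true, if_false, if_true]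
      have hne : (!acc.isEmpty) = true := by
        cases acc
        · exact absurd rfl hacc
        · rfl
      cases hb : pvIsBlank line
      · simp only [hne, Bool.and_true, Bool.false_eq_true, if_false]
        rw [ih (acc ++ [line]) (by simp)]
        simp [hb]
      · simp [hb, hne]

-- the common "suffix of the lines from the first marker to the next blank" selection
def pvSel (lines : List String) : Option (List String) :=
  (List.findIdx? pvIsMarker lines).map fun i =>
    List.take (1 + (List.findIdx? pvIsBlank (List.drop (i + 1) lines)).getD
                    (List.drop (i + 1) lines).length)
      (List.drop i lines)

-- locate phase: A's whole loop computes exactly pvSel (or [] if none)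
lemma pv_loop_eq_sel (lines : List String) : pvALoop lines [] false = (pvSel lines).getD [] := by
  induction lines with
  | nil => rfl
  | cons line ls ih =>
    by_cases hm : pvIsMarker line = true
    · rw [pvALoop]
      simp only [hm, if_true]
      rw [List.nil_append, pv_loop_collect ls [line] (by simp)]
      unfold pvSel
      simp only [List.findIdx?_cons, hm, if_true, Option.map_some, Option.getD_some,
        List.drop_succ_cons, List.drop_zero]
      rw [pv_takeWhile_findIdx pvIsBlank ls]
      rw [Nat.add_comm, List.take_succ_cons]
      rfl
    · have hm' : pvIsMarker line = false := by
        cases h : pvIsMarker line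
        · rfl
        · exact absurd h hm
      rw [pvALoop]
      simp only [hm', Bool.false_eq_true, if_false]
      rw [ih]
      unfold pvSel
      simp only [List.findIdx?_cons, hm', Bool.false_eq_true, if_false]
      cases hf : List.findIdx? pvIsMarker ls with
      | none => simp
      | some i => simp

-- dropping the leading non-marker part of an appended prefix
lemma pv_dropToMarker_append (pre tail : List String)
    (h : ∀ l ∈ pre, pvIsMarker l = false) :
    pvDropToMarker (pre ++ tail) = pvDropToMarker tail := by
  induction pre with
  | nil => rfl
  | cons a pre ih =>
    have ha := h a (by simp)
    rw [List.cons_append, pvDropToMarker]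
    simp only [ha, Bool.false_eq_true, if_false]
    exact ih (fun l hl => h l (by simp [hl]))

lemma pv_dropToMarker_nil (pre : List String) (h : ∀ l ∈ pre, pvIsMarker l = false) :
    pvDropToMarker pre = [] := by
  have := pv_dropToMarker_append pre [] h
  simpa using this

-- once a marker has entered the current paragraph, B's result is fixed:
-- the marker suffix extended by the following lines up to the next blank one
lemma pv_findPara_after (lines : List String) :
    ∀ pre m t, (∀ l ∈ pre, pvIsMarker l = false) → pvIsMarker m = true →
      pvFindPara (pvParasAux lines (pre ++ m :: t)) =
        some ((m :: t) ++ lines.takeWhile (fun l => !pvIsBlank l)) := by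
  induction lines with
  | nil =>
    intro pre m t hpre hm
    rw [pvParasAux, pvFindPara]
    rw [pv_dropToMarker_append pre (m :: t) hpre, pvDropToMarker]
    simp [hm]
  | cons l ls ih =>
    intro pre m t hpre hm
    rw [pvParasAux]
    cases hb : pvIsBlank l with
    | true =>
      simp only [if_true]
      rw [pvFindPara]
      rw [pv_dropToMarker_append pre (m :: t) hpre, pvDropToMarker]
      simp [hm, hb]
    | false =>
      simp only [Bool.false_eq_true, if_false]
      have : pre ++ m :: t ++ [l] = pre ++ m :: (t ++ [l]) := by simp
      rw [this, ih pre m (t ++ [l]) hpre hm]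
      simp [hb]

-- if every line of the current paragraph is a non-marker, B's scan computes pvSel
lemma pv_findPara_eq_sel (lines : List String) :
    ∀ cur, (∀ l ∈ cur, pvIsMarker l = false) →
      pvFindPara (pvParasAux lines cur) = pvSel lines := by
  induction lines with
  | nil =>
    intro cur hcur
    rw [pvParasAux, pvFindPara]
    rw [pv_dropToMarker_nil cur hcur]
    simp [pvSel, pvFindPara]
  | cons l ls ih =>
    intro cur hcur
    rw [pvParasAux]
    by_cases hm : pvIsMarker l = true
    · have hb : pvIsBlank l = false := pv_marker_not_blank l hm
      simp only [hb, Bool.false_eq_true, if_false]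
      rw [pv_findPara_after ls cur l [] hcur hm]
      unfold pvSel
      simp only [List.findIdx?_cons, hm, if_true, Option.map_some,
        List.drop_succ_cons, List.drop_zero]
      rw [pv_takeWhile_findIdx pvIsBlank ls]
      rw [Nat.add_comm, List.take_succ_cons]
      rfl
    · have hm' : pvIsMarker l = false := by
        cases h : pvIsMarker l
        · rfl
        · exact absurd h hm
      cases hb : pvIsBlank l with
      | true =>
        simp only [if_true]
        rw [pvFindPara]
        rw [pv_dropToMarker_nil cur hcur]
        simp only [List.isEmpty_nil, if_true]
        rw [ih [] (by simp)]
        unfold pvSel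
        simp only [List.findIdx?_cons, hm', Bool.false_eq_true, if_false]
        cases hf : List.findIdx? pvIsMarker ls with
        | none => simp
        | some i => simp
      | false =>
        simp only [Bool.false_eq_true, if_false]
        rw [ih (cur ++ [l]) (by intro x hx; rcases List.mem_append.mp hx with h | h
                                · exact hcur x h
                                · simp at h; subst h; exact hm')]
        unfold pvSel
        simp only [List.findIdx?_cons, hm', Bool.false_eq_true, if_false]
        cases hf : List.findIdx? pvIsMarker ls with
        | none => simp
        | some i => simp

-- pvSel never selects the empty list
lemma pv_sel_ne_nil (lines xs : List String) (h : pvSel lines = some xs) : xs ≠ [] := by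
  unfold pvSel at h
  cases hf : List.findIdx? pvIsMarker lines with
  | none => rw [hf] at h; simp at h
  | some i =>
    rw [hf] at h
    simp only [Option.map_some, Option.some_inj] at h
    have hi : i < lines.length := by
      have := List.findIdx?_eq_some_iff_findIdx_eq.mp hf
      omega
    subst h
    have hd : List.drop i lines ≠ [] := by
      intro hnil
      have := List.drop_eq_nil_iff.mp hnil
      omega
    cases hdrop : List.drop i lines with
    | nil => exact absurd hdrop hd
    | cons a t => simp

-- ===== VERDICT (by name: the statement is the Claim_ definition above) =====
theorem parse_dpv2_output_py_spec : Claim_equal_parse_dpv2_output_py := by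
  intro output _
  show parse_dpv2_output_py output = parse_dpv2_output_py_alt output
  have h1 := pv_findPara_eq_sel ((PySem.Str.split? output "\n").getD []) [] (by simp)
  have h2 := pv_loop_eq_sel ((PySem.Str.split? output "\n").getD [])
  simp only [parse_dpv2_output_py, parse_dpv2_output_py_alt]
  rw [h2, h1]
  cases hs : pvSel ((PySem.Str.split? output "\n").getD []) with
  | none => simp
  | some xs =>
    have hne := pv_sel_ne_nil _ xs hs
    have hne' : (!xs.isEmpty) = true := by
      cases xs
      · exact absurd rfl hne
      · rfl
    simp [hne']
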